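-- pv_equiv track=rewrite | github.com/KoEonYack/LevelUp-Algorithm | Others/Easy/Baek_8958.py | check
-- ===== SOURCE A (Python) =====
-- def check(inputStr):
--     ans = 0
--     flag = False
--     wight = 1
--
--     for char in inputStr:
--         if char == 'O' and flag is True:    # 두번 이상 O 만난 경우
--             ans += wight
--             wight += 1
--         elif char == 'O' and flag is False: # 처음 O 만난 경우
--             flag = False
--             ans += wight
--             wight += 1
--         else:                               # x의 경우
--             flag = False
--             wight = 1
--
--     return ans
-- ===== SOURCE B (Python) =====
-- def check(inputStr):
--     total = 0
--     i = 0
--     L = len(inputStr)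
--     while i < L:
--         if inputStr[i] == 'O':
--             j = i
--             while j < L and inputStr[j] == 'O':
--                 j += 1
--             n = j - i
--             total += n * (n + 1) // 2
--             i = j
--         else:
--             i += 1
--     return total
-- ===== Notes on version B (the rewrite author's own statement) =====
-- stated objective: alternative
-- what changed: Replaces the per-character weight accumulator with a run scanner: each maximal run of 'O' of length n contributes the closed-form triangular sum n*(n+1)//2.
import Mathlib
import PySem

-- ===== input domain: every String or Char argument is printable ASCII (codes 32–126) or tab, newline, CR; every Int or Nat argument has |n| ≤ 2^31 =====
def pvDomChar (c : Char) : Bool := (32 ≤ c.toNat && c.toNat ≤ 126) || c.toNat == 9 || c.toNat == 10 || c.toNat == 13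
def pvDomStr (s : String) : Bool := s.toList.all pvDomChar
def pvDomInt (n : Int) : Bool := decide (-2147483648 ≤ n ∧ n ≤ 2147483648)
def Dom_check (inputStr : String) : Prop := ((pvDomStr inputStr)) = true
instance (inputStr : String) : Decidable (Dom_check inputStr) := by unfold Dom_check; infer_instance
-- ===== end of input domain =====

-- B replaces A's per-character weight accumulator with a run scanner adding the
-- closed-form triangular sum n*(n+1)/2 per maximal run of 'O' (objective: alternative).

-- ===== PORT A =====
-- state (ans, flag, wight); branches in A's order (flag is never set to true, but ported as written)
def check (inputStr : String) : Int :=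
  (inputStr.toList.foldl
    (fun (s : Int × Bool × Int) c =>
      if c = 'O' ∧ s.2.1 = true then (s.1 + s.2.2, s.2.1, s.2.2 + 1)
      else if c = 'O' ∧ s.2.1 = false then (s.1 + s.2.2, false, s.2.2 + 1)
      else (s.1, false, 1))
    (0, false, 1)).1

-- ===== PORT B =====
-- run scanner: the inner `while` advancing j over 'O's is the takeWhile/dropWhile split
def checkAltGo : List Char → Int
  | [] => 0
  | c :: rest =>
    if c = 'O' then
      let n : Nat := 1 + (rest.takeWhile (fun x => x == 'O')).length
      ((n * (n + 1) / 2 : Nat) : Int) + checkAltGo (rest.dropWhile (fun x => x == 'O'))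
    else checkAltGo rest
termination_by l => l.length
decreasing_by
  · simp only [List.length_cons]
    exact Nat.lt_succ_of_le (List.length_dropWhile_le _ _)
  · simp

def check_alt (inputStr : String) : Int := checkAltGo inputStr.toList

-- ===== PRECONDITION & SPEC =====
def Spec_check (inputStr : String) (out : Int) : Prop := out = check_alt inputStr
instance (inputStr : String) (out : Int) : Decidable (Spec_check inputStr out) := by unfold Spec_check; infer_instance

-- ===== CLAIM (what is proved, stated in full; the proofs are below) =====
def Claim_equal_check : Prop := ∀ (inputStr : String), Dom_check inputStr → Spec_check inputStr (check inputStr)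

-- ===== LEMMAS AND PROOFS =====

-- A's loop as a recursion (flag eliminated: it is always false)
def goA : List Char → Int → Int → Int
  | [], a, _ => a
  | c :: l, a, w => if c = 'O' then goA l (a + w) (w + 1) else goA l a 1

theorem check_eq_goA_aux (l : List Char) (a w : Int) :
    (l.foldl
      (fun (s : Int × Bool × Int) c =>
        if c = 'O' ∧ s.2.1 = true then (s.1 + s.2.2, s.2.1, s.2.2 + 1)
        else if c = 'O' ∧ s.2.1 = false then (s.1 + s.2.2, false, s.2.2 + 1)
        else (s.1, false, 1))
      (a, false, w)).1 = goA l a w := by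
  induction l generalizing a w with
  | nil => simp [goA]
  | cons c l ih =>
    by_cases hc : c = 'O' <;> simp [goA, hc, ih]

-- the running sum w + (w+1) + … over a run
def T : Nat → Int → Int
  | 0, _ => 0
  | k + 1, w => w + T k (w + 1)

theorem goA_replicate (k : Nat) (d : List Char) (a w : Int) :
    goA (List.replicate k 'O' ++ d) a w = goA d (a + T k w) (w + k) := by
  induction k generalizing a w with
  | zero => simp [T]
  | succ k ih =>
    simp [List.replicate_succ, goA, ih, T]
    ring_nf

theorem T_double (k : Nat) (w : Int) : 2 * T k w = k * (2 * w + k - 1) := by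
  induction k generalizing w with
  | zero => simp [T]
  | succ k ih =>
    simp only [T, mul_add, ih]
    push_cast
    ring

theorem T_one (k : Nat) : T k 1 = ((k * (k + 1) / 2 : Nat) : Int) := by
  have h2 : 2 * T k 1 = (k : Int) * (k + 1) := by rw [T_double]; ring
  have he : 2 * (k * (k + 1) / 2) = k * (k + 1) :=
    Nat.two_mul_div_two_of_even (Nat.even_mul_succ_self k)
  have he' : (2 : Int) * ((k * (k + 1) / 2 : Nat) : Int) = ((k * (k + 1) : Nat) : Int) := by
    exact_mod_cast he
  have hk : ((k * (k + 1) : Nat) : Int) = (k : Int) * ((k : Int) + 1) := by push_cast; ring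
  linarith [h2, he', hk]

theorem takeWhile_O_replicate (l : List Char) :
    l.takeWhile (fun x => x == 'O') =
      List.replicate (l.takeWhile (fun x => x == 'O')).length 'O' := by
  apply List.eq_replicate_of_mem
  intro b hb
  have := List.mem_takeWhile_imp hb
  simpa using this

theorem head_dropWhile_ne_O (l : List Char) (c : Char) (r : List Char)
    (h : l.dropWhile (fun x => x == 'O') = c :: r) : c ≠ 'O' := by
  have := List.head?_dropWhile_not (fun x => x == 'O') l
  rw [h] at this
  simpa using this

theorem goA_eq_checkAltGo (l : List Char) (a : Int) : goA l a 1 = a + checkAltGo l := by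
  match l with
  | [] => simp [goA, checkAltGo]
  | c :: rest =>
    by_cases hc : c = 'O'
    · subst hc
      set t := rest.takeWhile (fun x => x == 'O') with ht
      set d := rest.dropWhile (fun x => x == 'O') with hd
      have hsplit : rest = t ++ d := (List.takeWhile_append_dropWhile).symm
      have hrep : ('O' :: rest) = List.replicate (1 + t.length) 'O' ++ d := by
        rw [Nat.add_comm, List.replicate_succ]
        simp only [List.cons_append]
        congr 1
        rw [hsplit, ht]
        congr 1
        exact takeWhile_O_replicate rest
      have hB : checkAltGo ('O' :: rest) =
          (((1 + t.length) * (1 + t.length + 1) / 2 : Nat) : Int) + checkAltGo d := by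
        simp [checkAltGo, ← ht, ← hd]
      rw [hB]
      conv_lhs => rw [hrep]
      rw [goA_replicate, T_one]
      match hdm : d with
      | [] => simp [goA, checkAltGo]
      | c' :: r =>
        have hc' : c' ≠ 'O' := head_dropWhile_ne_O rest c' r hd.symm
        have hlt : r.length < ('O' :: rest).length := by
          have h1 : d.length ≤ rest.length := List.length_dropWhile_le _ _
          rw [hdm] at h1
          simp only [List.length_cons] at h1 ⊢
          omega
        simp only [goA, checkAltGo, if_neg hc']
        rw [goA_eq_checkAltGo r]
        ring
    · simp only [goA, checkAltGo, if_neg hc]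
      exact goA_eq_checkAltGo rest a
termination_by l.length
decreasing_by
  all_goals first | exact hlt | simp

-- ===== VERDICT (by name: the statement is the Claim_ definition above) =====
theorem check_spec : Claim_equal_check := by
  intro s _
  unfold Spec_check check check_alt
  rw [check_eq_goA_aux, goA_eq_checkAltGo]
  simp
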